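-- pv_equiv track=rewrite | github.com/NinaKausch/CS-SMOL-TPO-model-publication | code/Utils.py | subsetBitCount
-- ===== SOURCE A (Python) =====
-- def subsetBitCount(bit_info, cmpd_list):
--     """ Returns a dictionary with bits count for data subset (cmpd_list)"""
--
--     from collections import Counter
--     from collections import defaultdict
--
--     subset_fp_count = Counter()
--     subset_list = defaultdict(list)
--
--     for cmpd in cmpd_list:
--         for fingerprint in bit_info[cmpd]:
--             subset_fp_count[fingerprint] += 1
--             subset_list[fingerprint].append(cmpd)
--
--     return (subset_fp_count, subset_list)
-- ===== SOURCE B (Python) =====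
-- def subsetBitCount(bit_info, cmpd_list):
--     """ Returns a dictionary with bits count for data subset (cmpd_list)"""
--
--     from collections import Counter
--     from collections import defaultdict
--
--     # Flatten into one event stream of (fingerprint, compound) occurrences,
--     # count fingerprints with the Counter constructor, then gather each
--     # fingerprint's compounds from the stream in one pass per fingerprint.
--     pairs = [(fp, cmpd) for cmpd in cmpd_list for fp in bit_info[cmpd]]
--
--     subset_fp_count = Counter(fp for fp, _ in pairs)
--
--     subset_list = defaultdict(list)
--     for fp in subset_fp_count:
--         subset_list[fp] = [cmpd for f, cmpd in pairs if f == fp]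
--
--     return (subset_fp_count, subset_list)
-- ===== Notes on version B (the rewrite author's own statement) =====
-- stated objective: alternative
-- what changed: B flattens the data into one (fingerprint, compound) event stream, builds the Counter directly from that stream with the Counter constructor, and then gathers each fingerprint's compound list by filtering the stream once per distinct fingerprint, instead of A's incremental in-loop updating of both dicts; B trades an extra pass per distinct bit for a staged, stream-based decomposition.
import Mathlib
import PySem

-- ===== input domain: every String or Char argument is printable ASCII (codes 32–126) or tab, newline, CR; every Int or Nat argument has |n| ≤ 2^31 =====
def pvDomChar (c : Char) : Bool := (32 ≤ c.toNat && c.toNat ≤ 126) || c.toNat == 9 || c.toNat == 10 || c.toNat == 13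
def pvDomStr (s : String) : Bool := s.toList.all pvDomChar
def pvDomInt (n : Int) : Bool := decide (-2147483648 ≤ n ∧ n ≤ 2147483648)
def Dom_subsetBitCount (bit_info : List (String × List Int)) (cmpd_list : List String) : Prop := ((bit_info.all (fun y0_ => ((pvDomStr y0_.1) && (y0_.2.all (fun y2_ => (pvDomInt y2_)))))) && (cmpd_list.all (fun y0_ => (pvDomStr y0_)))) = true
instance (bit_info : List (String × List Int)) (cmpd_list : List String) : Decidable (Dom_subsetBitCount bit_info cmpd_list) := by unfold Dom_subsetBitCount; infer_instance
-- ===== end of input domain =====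

-- B flattens the data into one (fingerprint, compound) event stream, counts it with the
-- Counter constructor and gathers each fingerprint's compounds from the stream per key,
-- instead of A's incremental updating of two dicts inside the double loop (objective: alternative).

-- ===== PORT A =====
-- Counter() and defaultdict(list) updated together in the double loop; bit_info[cmpd] is a dict lookup.
def subsetBitCount (bit_info : List (String × List Int)) (cmpd_list : List String) : (List (Int × Int)) × (List (Int × List String)) :=
  let d := PySem.Dict.mk bit_info
  let st := cmpd_list.foldl
    (fun (st : PySem.Dict Int Int × PySem.Dict Int (List String)) cmpd =>
      (d.getD cmpd []).foldl
        (fun st fingerprint =>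
          (st.1.modify fingerprint 0 (· + 1), st.2.modify fingerprint [] (· ++ [cmpd])))
        st)
    (PySem.Dict.empty, PySem.Dict.empty)
  (st.1.items, st.2.items)

-- ===== PORT B =====
-- pairs = flattened event stream; Counter(generator) = PySem.Dict.counter; then one
-- filtering pass over pairs per counter key, assigned into the defaultdict.
def subsetBitCount_alt (bit_info : List (String × List Int)) (cmpd_list : List String) : (List (Int × Int)) × (List (Int × List String)) :=
  let d := PySem.Dict.mk bit_info
  let pairs := cmpd_list.flatMap (fun cmpd => (d.getD cmpd []).map (fun fp => (fp, cmpd)))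
  let subset_fp_count := PySem.Dict.counter (pairs.map Prod.fst)
  let subset_list := subset_fp_count.keys.foldl
    (fun (acc : PySem.Dict Int (List String)) fp =>
      acc.insert fp ((pairs.filter (fun p => p.1 == fp)).map Prod.snd))
    PySem.Dict.empty
  (subset_fp_count.items, subset_list.items)

-- ===== PRECONDITION & SPEC =====
-- Pre_ excludes compounds missing from bit_info, where Python's bit_info[cmpd] raises KeyError.
def Pre_subsetBitCount (bit_info : List (String × List Int)) (cmpd_list : List String) : Prop :=
  ∀ c ∈ cmpd_list, (PySem.Dict.mk bit_info).contains c = true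
instance (bit_info : List (String × List Int)) (cmpd_list : List String) : Decidable (Pre_subsetBitCount bit_info cmpd_list) := by unfold Pre_subsetBitCount; infer_instance
def pvWitness_subsetBitCount : (List (String × List Int)) × List String :=
  ([("x", [1, 2, 1]), ("y", [2, 3])], ["x", "y", "x"])

def Spec_subsetBitCount (bit_info : List (String × List Int)) (cmpd_list : List String) (out : (List (Int × Int)) × (List (Int × List String))) : Prop := out = subsetBitCount_alt bit_info cmpd_list
instance (bit_info : List (String × List Int)) (cmpd_list : List String) (out : (List (Int × Int)) × (List (Int × List String))) : Decidable (Spec_subsetBitCount bit_info cmpd_list out) := by unfold Spec_subsetBitCount; infer_instance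

-- ===== CLAIM (what is proved, stated in full; the proofs are below) =====
def Claim_equal_subsetBitCount : Prop := ∀ (bit_info : List (String × List Int)) (cmpd_list : List String), Dom_subsetBitCount bit_info cmpd_list → Pre_subsetBitCount bit_info cmpd_list → Spec_subsetBitCount bit_info cmpd_list (subsetBitCount bit_info cmpd_list)

-- ===== LEMMAS AND PROOFS =====

-- A's nested counting fold over cmpd_list is one fold over the flattened pair stream
theorem pv_flat_cnt (d : PySem.Dict String (List Int)) (cl : List String) (init : PySem.Dict Int Int) :
    cl.foldl (fun acc cmpd => (d.getD cmpd []).foldl (fun acc fp => acc.modify fp 0 (· + 1)) acc) init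
      = (cl.flatMap (fun cmpd => (d.getD cmpd []).map (fun fp => (fp, cmpd)))).foldl
          (fun acc p => acc.modify p.1 0 (· + 1)) init := by
  induction cl generalizing init with
  | nil => rfl
  | cons c cl ih =>
    simp only [List.foldl_cons, List.flatMap_cons, List.foldl_append, List.foldl_map, ih]

-- likewise for the list-building fold
theorem pv_flat_lst (d : PySem.Dict String (List Int)) (cl : List String) (init : PySem.Dict Int (List String)) :
    cl.foldl (fun acc cmpd => (d.getD cmpd []).foldl (fun acc fp => acc.modify fp [] (· ++ [cmpd])) acc) init
      = (cl.flatMap (fun cmpd => (d.getD cmpd []).map (fun fp => (fp, cmpd)))).foldl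
          (fun acc p => acc.modify p.1 [] (· ++ [p.2])) init := by
  induction cl generalizing init with
  | nil => rfl
  | cons c cl ih =>
    simp only [List.foldl_cons, List.flatMap_cons, List.foldl_append, List.foldl_map, ih]

-- A's pair-state fold splits into two independent folds
theorem pv_split (d : PySem.Dict String (List Int)) (cl : List String)
    (st : PySem.Dict Int Int × PySem.Dict Int (List String)) :
    cl.foldl
      (fun (st : PySem.Dict Int Int × PySem.Dict Int (List String)) cmpd =>
        (d.getD cmpd []).foldl
          (fun st fingerprint =>
            (st.1.modify fingerprint 0 (· + 1), st.2.modify fingerprint [] (· ++ [cmpd])))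
          st)
      st
    = (cl.foldl (fun acc cmpd => (d.getD cmpd []).foldl (fun acc fp => acc.modify fp 0 (· + 1)) acc) st.1,
       cl.foldl (fun acc cmpd => (d.getD cmpd []).foldl (fun acc fp => acc.modify fp [] (· ++ [cmpd])) acc) st.2) := by
  induction cl generalizing st with
  | nil => rfl
  | cons c cl ih =>
    obtain ⟨a, b⟩ := st
    rw [List.foldl_cons, List.foldl_cons, List.foldl_cons,
        PySem.List.foldl_prod_mk (fun (x : PySem.Dict Int Int) fp => x.modify fp 0 (· + 1)) (fun (y : PySem.Dict Int (List String)) fp => y.modify fp [] (· ++ [c])) (d.getD c []) a b, ih]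

-- ===== VERDICT (by name: the statement is the Claim_ definition above) =====
theorem subsetBitCount_spec : Claim_equal_subsetBitCount := by
  intro bit_info cmpd_list _ _
  simp only [Spec_subsetBitCount, subsetBitCount, subsetBitCount_alt]
  rw [pv_split]
  set d := PySem.Dict.mk bit_info with hd
  set pairs := cmpd_list.flatMap (fun cmpd => (d.getD cmpd []).map (fun fp => (fp, cmpd))) with hpairs
  -- counter side: A's nested counting fold IS Counter(pairs.map fst)
  have hcnt : cmpd_list.foldl (fun acc cmpd => (d.getD cmpd []).foldl (fun acc fp => acc.modify fp 0 (· + 1)) acc) PySem.Dict.empty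
      = PySem.Dict.counter (pairs.map Prod.fst) := by
    rw [pv_flat_cnt, PySem.Dict.counter_eq_foldl, List.foldl_map]
  -- list side
  set dl := cmpd_list.foldl (fun acc cmpd => (d.getD cmpd []).foldl (fun acc fp => acc.modify fp [] (· ++ [cmpd])) acc) PySem.Dict.empty with hdl
  have hdl_flat : dl = pairs.foldl (fun acc p => acc.modify p.1 [] (· ++ [p.2])) PySem.Dict.empty := by
    rw [hdl, pv_flat_lst]
  have hkeys : dl.keys = PySem.Set.ofList (pairs.map Prod.fst) := by
    rw [hdl_flat, PySem.Dict.keys_foldl_modify_key, PySem.Dict.keys_empty, PySem.Set.update_nil_left]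
  have hnd : dl.keys.Nodup := by
    rw [hkeys]; exact PySem.Set.nodup_ofList _
  have hget : ∀ k : Int, dl.getD k [] = (pairs.filter (fun p => p.1 == k)).map Prod.snd := by
    intro k
    rw [hdl_flat, PySem.Dict.getD_foldl_modify_append, PySem.Dict.getD_empty, List.nil_append]
  -- B's inserted dict over the counter's (fresh, nodup) keys
  have hckeys : (PySem.Dict.counter (pairs.map Prod.fst) : PySem.Dict Int Int).keys = PySem.Set.ofList (pairs.map Prod.fst) :=
    PySem.Dict.keys_counter _
  have hB : ((PySem.Dict.counter (pairs.map Prod.fst) : PySem.Dict Int Int).keys.foldl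
      (fun (acc : PySem.Dict Int (List String)) fp =>
        acc.insert fp ((pairs.filter (fun p => p.1 == fp)).map Prod.snd))
      PySem.Dict.empty).items
      = (PySem.Dict.counter (pairs.map Prod.fst) : PySem.Dict Int Int).keys.map
          (fun fp => (fp, (pairs.filter (fun p => p.1 == fp)).map Prod.snd)) := by
    rw [PySem.Dict.items_foldl_insert_fresh
      ((PySem.Dict.counter (pairs.map Prod.fst) : PySem.Dict Int Int).keys)
      (fun a => a)
      (fun fp => (pairs.filter (fun p => p.1 == fp)).map Prod.snd)
      PySem.Dict.empty
      (fun a _ => PySem.Dict.contains_empty a)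
      (by simp)]
    simp [PySem.Dict.empty]
  have hA_items : dl.items = dl.keys.map (fun k => (k, dl.getD k [])) :=
    PySem.Dict.items_eq_map_keys dl hnd []
  refine Prod.ext ?_ ?_
  · simp only [hcnt]
  · rw [hA_items, hB, hkeys, hckeys]
    exact List.map_congr_left (fun k _ => by rw [hget k])
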